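-- pv_equiv track=rewrite | github.com/ITMO-PhysTech-2022/assignment-02-functions-data | test/ab/functions/test_print_tree.py | _check
-- ===== SOURCE A (Python) =====
-- def _check(result, answer):
--     n = answer
--     result = result.split('\n')
--     while len(result) > 0 and result[-1].strip() == '':
--         result.pop()
--     if len(result) != n * (n + 1) // 2:
--         return False, f'Ожидалось {n * (n + 1) // 2} строк в выводе, выведено {len(result)}'
--
--     idx = 0
--     for i in range(1, n + 1):
--         for j in range(1, i + 1):
--             s = j * 2 - 1
--             spaces, stars, stage = 0, 0, 0
--             for c in result[idx]:
--                 if stage == 0: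
--                     if c == ' ':
--                         spaces += 1
--                     else:
--                         stage = 1
--                 if stage == 1:
--                     if c == '*':
--                         stars += 1
--                     else:
--                         stage = 2
--                 if stage == 2:
--                     if c != ' ':
--                         return False, f'На строке {idx + 1} встречен символ \'{c}\' после полосы из \'*\''
--             if spaces != n - j:
--                 return False, f'Ожидалось {n - j} пробелов в начале {idx + 1}-й строки, выведено {spaces}'
--             if stars != s:
--                 return False, f'Ожидалась полоса из {s} звезд на строке {idx + 1}, выведено {stars}'
--             idx += 1
--
--     return True, 'Ok'
-- ===== SOURCE B (Python) =====
-- def _check(result, answer):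
--     n = answer
--     lines = result.split('\n')
--     while len(lines) > 0 and lines[-1].strip() == '':
--         lines.pop()
--     total = n * (n + 1) // 2
--     if len(lines) != total:
--         return False, f'Ожидалось {total} строк в выводе, выведено {len(lines)}'
--
--     # flat list of expected star widths j, one per output line
--     widths = [j for i in range(1, n + 1) for j in range(1, i + 1)]
--     for idx, (line, j) in enumerate(zip(lines, widths)):
--         expected = ' ' * (n - j) + '*' * (2 * j - 1)
--         if line.rstrip(' ') == expected:
--             continue
--         # mismatch: diagnose with the reference's priorities and messages
--         stripped = line.lstrip(' ')
--         spaces = len(line) - len(stripped)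
--         body = stripped.lstrip('*')
--         stars = len(stripped) - len(body)
--         for c in body:
--             if c != ' ':
--                 return False, f'На строке {idx + 1} встречен символ \'{c}\' после полосы из \'*\''
--         if spaces != n - j:
--             return False, f'Ожидалось {n - j} пробелов в начале {idx + 1}-й строки, выведено {spaces}'
--         return False, f'Ожидалась полоса из {2 * j - 1} звезд на строке {idx + 1}, выведено {stars}'
--
--     return True, 'Ok'
-- ===== Notes on version B (the rewrite author's own statement) =====
-- stated objective: alternative
-- what changed: A classifies every character of every line through a three-state machine inside nested i,j loops; B instead flattens the two loops into one precomputed width list, GENERATES the expected line ' '*(n-j)+'*'*(2*j-1) for each row and accepts when it equals the line with trailing spaces stripped, only running a strip-based diagnosis to reconstruct the reference error message on a mismatch.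
import Mathlib
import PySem

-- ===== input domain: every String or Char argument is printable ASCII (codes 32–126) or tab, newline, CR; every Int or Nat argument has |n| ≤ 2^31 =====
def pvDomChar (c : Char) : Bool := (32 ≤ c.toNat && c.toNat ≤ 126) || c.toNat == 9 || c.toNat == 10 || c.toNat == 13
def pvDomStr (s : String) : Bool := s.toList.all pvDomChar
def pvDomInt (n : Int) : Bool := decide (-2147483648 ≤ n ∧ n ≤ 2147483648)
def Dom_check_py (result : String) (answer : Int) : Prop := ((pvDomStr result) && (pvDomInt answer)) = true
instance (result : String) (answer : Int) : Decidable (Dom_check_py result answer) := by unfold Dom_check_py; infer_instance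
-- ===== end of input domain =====

-- B validates each line by GENERATING the expected line (' '*(n-j) + '*'*(2j-1)) from a
-- flattened width list and comparing it with the line's space-rstripped text, only falling
-- back to a strip-based diagnosis to build the reference error message on a mismatch;
-- A scans every character of every line through a three-state machine. Same return values.

-- helpers shared by both ports: the preprocessing and the message builders are the SAME
-- Python lines in A and in B, so they are shared here.

-- while len(lines) > 0 and lines[-1].strip() == '': lines.pop()
def popBlanks (xs : List String) : List String :=
  if h : xs = [] then xs
  else if PySem.Str.strip (xs.getLast h) == "" then popBlanks xs.dropLast
  else xs
termination_by xs.length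
decreasing_by
  simp [List.length_dropLast]
  exact List.length_pos_of_ne_nil h

def errCount (total len_ : Int) : String :=
  "Ожидалось " ++ PySem.Int.toStr total ++ " строк в выводе, выведено " ++ PySem.Int.toStr len_
def errTail (idx : Int) (c : Char) : String :=
  "На строке " ++ PySem.Int.toStr (idx + 1) ++ " встречен символ '" ++ String.ofList [c] ++ "' после полосы из '*'"
def errSpaces (exp idx got : Int) : String :=
  "Ожидалось " ++ PySem.Int.toStr exp ++ " пробелов в начале " ++ PySem.Int.toStr (idx + 1) ++ "-й строки, выведено " ++ PySem.Int.toStr got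
def errStars (s idx got : Int) : String :=
  "Ожидалась полоса из " ++ PySem.Int.toStr s ++ " звезд на строке " ++ PySem.Int.toStr (idx + 1) ++ ", выведено " ++ PySem.Int.toStr got

-- ===== PORT A =====
-- the single character loop with state (spaces, stars, stage); Sum.inl = early return
def lineLoopA (idx : Int) (cs : List Char) (spaces stars stage : Int) : (Bool × String) ⊕ (Int × Int) :=
  match cs with
  | [] => Sum.inr (spaces, stars)
  | c :: rest =>
    let p1 : Int × Int :=
      if stage = 0 then (if c = ' ' then (spaces + 1, stage) else (spaces, 1)) else (spaces, stage)
    let spaces' := p1.1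
    let stage1 := p1.2
    let p2 : Int × Int :=
      if stage1 = 1 then (if c = '*' then (stars + 1, stage1) else (stars, 2)) else (stars, stage1)
    let stars' := p2.1
    let stage2 := p2.2
    if stage2 = 2 ∧ c ≠ ' ' then Sum.inl (false, errTail idx c)
    else lineLoopA idx rest spaces' stars' stage2

def checkLineA (n idx j : Int) (line : String) : Option (Bool × String) :=
  let s := j * 2 - 1
  match lineLoopA idx line.toList 0 0 0 with
  | Sum.inl e => some e
  | Sum.inr (spaces, stars) =>
    if spaces ≠ n - j then some (false, errSpaces (n - j) idx spaces)
    else if stars ≠ s then some (false, errStars s idx stars)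
    else none

-- for j in range(1, i + 1): … (idx is in range whenever this is reached, so the default "" of pyGetD is never used)
def innerA (n : Int) (lines : List String) (idx : Int) : List Int → (Bool × String) ⊕ Int
  | [] => Sum.inr idx
  | j :: js =>
    match checkLineA n idx j (PySem.List.pyGetD lines idx "") with
    | some e => Sum.inl e
    | none => innerA n lines (idx + 1) js

-- for i in range(1, n + 1): …
def outerA (n : Int) (lines : List String) (idx : Int) : List Int → Option (Bool × String)
  | [] => none
  | i :: is_ =>
    match innerA n lines idx (PySem.List.pyRange 1 (i + 1) 1) with
    | Sum.inl e => some e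
    | Sum.inr idx' => outerA n lines idx' is_

def check_py (result : String) (answer : Int) : Bool × String :=
  let n := answer
  let lines := popBlanks ((PySem.Str.split? result "\n").getD [])  -- sep ≠ "", so split? is never none
  let total := PySem.Int.floordiv (n * (n + 1)) 2
  if (lines.length : Int) ≠ total then (false, errCount total (lines.length : Int))
  else
    match outerA n lines 0 (PySem.List.pyRange 1 (n + 1) 1) with
    | some e => e
    | none => (true, "Ok")

-- ===== PORT B =====
-- widths = [j for i in range(1, n + 1) for j in range(1, i + 1)]
def widthsList (n : Int) : List Int :=
  (PySem.List.pyRange 1 (n + 1) 1).flatMap (fun i => PySem.List.pyRange 1 (i + 1) 1)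

-- line.rstrip(' '): hand port on List Char (single-char strip set; exact)
def rstripSp (cs : List Char) : List Char := (cs.reverse.dropWhile (· = ' ')).reverse

-- for c in body: if c != ' ': return … — the first offending character
def firstBad : List Char → Option Char
  | [] => none
  | c :: rest => if c ≠ ' ' then some c else firstBad rest

-- _line_error: None iff the line is the expected one (up to trailing spaces); else the message
def lineError (n idx j : Int) (line : String) : Option (Bool × String) :=
  let expected := List.replicate (n - j).toNat ' ' ++ List.replicate (2 * j - 1).toNat '*'
  if rstripSp line.toList = expected then none
  else
    let stripped := line.toList.dropWhile (· = ' ')          -- line.lstrip(' ') (hand port, exact)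
    let spaces : Int := (line.toList.length : Int) - (stripped.length : Int)
    let body := stripped.dropWhile (· = '*')                 -- stripped.lstrip('*') (hand port, exact)
    let stars : Int := (stripped.length : Int) - (body.length : Int)
    match firstBad body with
    | some c => some (false, errTail idx c)
    | none =>
      if spaces ≠ n - j then some (false, errSpaces (n - j) idx spaces)
      else some (false, errStars (2 * j - 1) idx stars)

-- for idx, (line, j) in enumerate(zip(lines, widths)): …
def loopB (n : Int) : Int → List (String × Int) → Bool × String
  | _, [] => (true, "Ok")
  | idx, (line, j) :: rest =>
    match lineError n idx j line with
    | some e => e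
    | none => loopB n (idx + 1) rest

def check_py_alt (result : String) (answer : Int) : Bool × String :=
  let n := answer
  let lines := popBlanks ((PySem.Str.split? result "\n").getD [])  -- sep ≠ "", so split? is never none
  let total := PySem.Int.floordiv (n * (n + 1)) 2
  if (lines.length : Int) ≠ total then (false, errCount total (lines.length : Int))
  else loopB n 0 (lines.zip (widthsList n))

-- ===== PRECONDITION & SPEC =====
def Spec_check_py (result : String) (answer : Int) (out : Bool × String) : Prop := out = check_py_alt result answer
instance (result : String) (answer : Int) (out : Bool × String) : Decidable (Spec_check_py result answer out) := by unfold Spec_check_py; infer_instance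

-- ===== CLAIM (what is proved, stated in full; the proofs are below) =====
def Claim_equal_check_py : Prop := ∀ (result : String) (answer : Int), Dom_check_py result answer → Spec_check_py result answer (check_py result answer)

-- ===== LEMMAS AND PROOFS =====

theorem lineLoopA_stage2 (idx : Int) (cs : List Char) (sp st : Int) :
    lineLoopA idx cs sp st 2 =
      (match firstBad cs with
       | some c => Sum.inl (false, errTail idx c)
       | none => Sum.inr (sp, st)) := by
  induction cs with
  | nil => simp [lineLoopA, firstBad]
  | cons c rest ih =>
    by_cases h : c = ' ' <;> simp [lineLoopA, firstBad, h, ih]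

theorem lineLoopA_stage1 (idx : Int) (cs : List Char) (sp st : Int) :
    lineLoopA idx cs sp st 1 =
      (match firstBad (cs.dropWhile (· = '*')) with
       | some c => Sum.inl (false, errTail idx c)
       | none => Sum.inr (sp, st + ((cs.takeWhile (· = '*')).length : Int))) := by
  induction cs generalizing st with
  | nil => simp [lineLoopA, firstBad]
  | cons c rest ih =>
    by_cases h : c = '*'
    · subst h
      cases hfb : firstBad (rest.dropWhile (· = '*')) with
      | some e => simp [lineLoopA, ih, hfb]
      | none =>
        simp [lineLoopA, ih, hfb]
        ring
    · by_cases hs : c = ' '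
      · subst hs
        simp [lineLoopA, h, lineLoopA_stage2, firstBad]
      · simp [lineLoopA, firstBad, h, hs]

theorem lineLoopA_stage0 (idx : Int) (cs : List Char) (sp : Int) :
    lineLoopA idx cs sp 0 0 =
      (match firstBad ((cs.dropWhile (· = ' ')).dropWhile (· = '*')) with
       | some c => Sum.inl (false, errTail idx c)
       | none => Sum.inr (sp + ((cs.takeWhile (· = ' ')).length : Int),
                          (((cs.dropWhile (· = ' ')).takeWhile (· = '*')).length : Int))) := by
  induction cs generalizing sp with
  | nil => simp [lineLoopA, firstBad]
  | cons c rest ih =>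
    by_cases h : c = ' '
    · subst h
      cases hfb : firstBad ((rest.dropWhile (· = ' ')).dropWhile (· = '*')) with
      | some e => simp [lineLoopA, ih, hfb]
      | none =>
        simp [lineLoopA, ih, hfb]
        ring
    · by_cases hst : c = '*'
      · subst hst
        cases hfb : firstBad (rest.dropWhile (· = '*')) with
        | some e => simp [lineLoopA, h, lineLoopA_stage1, hfb]
        | none =>
          simp [lineLoopA, h, lineLoopA_stage1, hfb]
          ring
      · simp [lineLoopA, firstBad, h, hst]

-- replicate prefixes pass through takeWhile/dropWhile
theorem takeWhile_rep_append (p : Char → Bool) (x : Char) (hx : p x = true) (k : Nat) (l : List Char) :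
    (List.replicate k x ++ l).takeWhile p = List.replicate k x ++ l.takeWhile p := by
  induction k with
  | zero => simp
  | succ k ih => simp [List.replicate_succ, hx, ih]

theorem dropWhile_rep_append (p : Char → Bool) (x : Char) (hx : p x = true) (k : Nat) (l : List Char) :
    (List.replicate k x ++ l).dropWhile p = l.dropWhile p := by
  induction k with
  | zero => simp
  | succ k ih => simp [List.replicate_succ, hx, ih]

theorem rep_star_cons (b : Nat) (hb : 1 ≤ b) (l : List Char) :
    List.replicate b '*' ++ l = '*' :: (List.replicate (b - 1) '*' ++ l) := by
  cases b with
  | zero => omega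
  | succ b => simp [List.replicate_succ]

theorem firstBad_rep_sp (m : Nat) : firstBad (List.replicate m ' ') = none := by
  induction m with
  | zero => rfl
  | succ m ih => simp [List.replicate_succ, firstBad, ih]

-- the canonical shape ' '^a ++ '*'^b ++ ' '^m (b ≥ 1) under rstrip/takeWhile/dropWhile
theorem rstrip_canonical (a b m : Nat) (hb : 1 ≤ b) :
    rstripSp (List.replicate a ' ' ++ List.replicate b '*' ++ List.replicate m ' ') =
      List.replicate a ' ' ++ List.replicate b '*' := by
  unfold rstripSp
  rw [List.reverse_append, List.reverse_append, List.reverse_replicate, List.reverse_replicate,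
      List.reverse_replicate, dropWhile_rep_append _ ' ' (by decide) m,
      rep_star_cons b hb, List.dropWhile_cons]
  simp only [show (decide ('*' = ' ')) = false by decide, Bool.false_eq_true, if_false]
  rw [← rep_star_cons b hb]
  simp [List.reverse_append, List.reverse_replicate]

theorem tw_sp_canonical (a b m : Nat) (hb : 1 ≤ b) :
    (List.replicate a ' ' ++ List.replicate b '*' ++ List.replicate m ' ').takeWhile (· = ' ') =
      List.replicate a ' ' := by
  rw [List.append_assoc, takeWhile_rep_append _ ' ' (by decide), rep_star_cons b hb]
  simp

theorem dw_sp_canonical (a b m : Nat) (hb : 1 ≤ b) :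
    (List.replicate a ' ' ++ List.replicate b '*' ++ List.replicate m ' ').dropWhile (· = ' ') =
      List.replicate b '*' ++ List.replicate m ' ' := by
  rw [List.append_assoc, dropWhile_rep_append _ ' ' (by decide), rep_star_cons b hb,
      List.dropWhile_cons]
  simp [← rep_star_cons b hb]

theorem tw_star_canonical (b m : Nat) :
    (List.replicate b '*' ++ List.replicate m ' ').takeWhile (· = '*') = List.replicate b '*' := by
  rw [takeWhile_rep_append _ '*' (by decide)]
  cases m with
  | zero => simp
  | succ m => simp [List.replicate_succ]

theorem dw_star_canonical (b m : Nat) :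
    (List.replicate b '*' ++ List.replicate m ' ').dropWhile (· = '*') = List.replicate m ' ' := by
  rw [dropWhile_rep_append _ '*' (by decide)]
  cases m with
  | zero => rfl
  | succ m => simp [List.replicate_succ]

-- rstrip decomposition: cs = rstripSp cs ++ ' '^m
theorem rstrip_decomp (cs : List Char) :
    cs = rstripSp cs ++ List.replicate (cs.reverse.takeWhile (· = ' ')).length ' ' := by
  unfold rstripSp
  conv_lhs => rw [← List.reverse_reverse cs, ← List.takeWhile_append_dropWhile (p := (· = ' ')) (l := cs.reverse)]
  rw [List.reverse_append]
  congr 1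
  rw [List.eq_replicate_iff]
  refine ⟨by simp, ?_⟩
  intro c hc
  rw [List.mem_reverse] at hc
  have := List.mem_takeWhile_imp hc
  simpa using this

-- a list whose characters are all ' ' per firstBad is a replicate
theorem firstBad_none_eq (l : List Char) (h : firstBad l = none) :
    l = List.replicate l.length ' ' := by
  induction l with
  | nil => rfl
  | cons c rest ih =>
    by_cases hc : c = ' '
    · subst hc
      have h' : firstBad rest = none := by simpa [firstBad] using h
      simpa [List.replicate_succ] using ih h' 
    · simp [firstBad, hc] at h

-- takeWhile (· = ch) is a replicate of ch
theorem takeWhile_eq_rep (ch : Char) (l : List Char) :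
    l.takeWhile (· = ch) = List.replicate (l.takeWhile (· = ch)).length ch := by
  rw [List.eq_replicate_iff]
  refine ⟨rfl, ?_⟩
  intro c hc
  have := List.mem_takeWhile_imp hc
  simpa using this

-- the per-line equivalence: A's state machine = B's generate-and-compare, for 1 ≤ j ≤ n
theorem checkLine_eq (n idx j : Int) (line : String) (h1 : 1 ≤ j) (h2 : j ≤ n) :
    checkLineA n idx j line = lineError n idx j line := by
  have hb1 : 1 ≤ (2 * j - 1).toNat := by omega
  have hbe : ((2 * j - 1).toNat : Int) = 2 * j - 1 := by omega
  have hae : ((n - j).toNat : Int) = n - j := by omega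
  have h2j : j * 2 - 1 = 2 * j - 1 := by ring
  simp only [checkLineA, lineError, lineLoopA_stage0]
  by_cases hc : rstripSp line.toList =
      List.replicate (n - j).toNat ' ' ++ List.replicate (2 * j - 1).toNat '*'
  · -- the line is canonical: A also accepts it
    have hdec := rstrip_decomp line.toList
    rw [hc, List.append_assoc] at hdec
    set a := (n - j).toNat with ha
    set b := (2 * j - 1).toNat with hb
    set m := (line.toList.reverse.takeWhile (· = ' ')).length with hm
    rw [hdec, ← List.append_assoc]
    rw [dw_sp_canonical a b m hb1, dw_star_canonical, firstBad_rep_sp,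
        tw_sp_canonical a b m hb1, tw_star_canonical, rstrip_canonical a b m hb1]
    simp [hae, hbe, h2j]
  · rw [if_neg hc]
    -- both sides now compute from the same takeWhile/dropWhile data
    set tw := line.toList.takeWhile (· = ' ') with htw
    set dw := line.toList.dropWhile (· = ' ') with hdw
    have hsp : (line.toList.length : Int) - (dw.length : Int) = (tw.length : Int) := by
      have h := List.takeWhile_append_dropWhile (p := (· = ' ')) (l := line.toList)
      have hlen : tw.length + dw.length = line.toList.length := by
        rw [← List.length_append, htw, hdw, h]
      omega
    have hst : (dw.length : Int) - ((dw.dropWhile (· = '*')).length : Int) =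
        ((dw.takeWhile (· = '*')).length : Int) := by
      have h := List.takeWhile_append_dropWhile (p := (· = '*')) (l := dw)
      have hlen : (dw.takeWhile (· = '*')).length + (dw.dropWhile (· = '*')).length = dw.length := by
        rw [← List.length_append, h]
      omega
    rw [hsp, hst]
    cases hfb : firstBad (dw.dropWhile (· = '*')) with
    | some c => rfl
    | none =>
      by_cases hsp' : (tw.length : Int) = n - j
      · by_cases hst' : ((dw.takeWhile (· = '*')).length : Int) = 2 * j - 1
        · -- all three agree: then the line was canonical, contradicting hc
          exfalso
          apply hc
          have hbody := firstBad_none_eq _ hfb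
          have htw2 : tw = List.replicate (n - j).toNat ' ' := by
            have h3 := takeWhile_eq_rep ' ' line.toList
            rw [← htw] at h3
            rw [h3]
            congr 1
            omega
          have hstar2 : dw.takeWhile (· = '*') = List.replicate (2 * j - 1).toNat '*' := by
            rw [takeWhile_eq_rep '*' dw]
            congr 1
            omega
          have hsplit : line.toList = tw ++ (dw.takeWhile (· = '*') ++ dw.dropWhile (· = '*')) := by
            rw [List.takeWhile_append_dropWhile, htw, hdw, List.takeWhile_append_dropWhile]
          rw [hsplit, htw2, hstar2, hbody, ← List.append_assoc,
              rstrip_canonical _ _ _ hb1]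
        · simp [h2j, hsp', hst']
      · simp [hsp']

-- flattening A's nested loops: process a flat list of j's
def flatA (n : Int) (lines : List String) : Int → List Int → Option (Bool × String)
  | _, [] => none
  | idx, j :: js =>
    match checkLineA n idx j (PySem.List.pyGetD lines idx "") with
    | some e => some e
    | none => flatA n lines (idx + 1) js

theorem flatA_append (n : Int) (lines : List String) (js ys : List Int) (idx : Int) :
    flatA n lines idx (js ++ ys) =
      (match innerA n lines idx js with
       | Sum.inl e => some e
       | Sum.inr idx' => flatA n lines idx' ys) := by
  induction js generalizing idx with
  | nil => rfl
  | cons j js ih =>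
    simp only [List.cons_append, flatA, innerA]
    cases checkLineA n idx j (PySem.List.pyGetD lines idx "") with
    | some e => rfl
    | none => exact ih _

theorem outerA_eq_flat (n : Int) (lines : List String) (is_ : List Int) (idx : Int) :
    outerA n lines idx is_ =
      flatA n lines idx (is_.flatMap (fun i => PySem.List.pyRange 1 (i + 1) 1)) := by
  induction is_ generalizing idx with
  | nil => rfl
  | cons i is_ ih =>
    simp only [outerA, List.flatMap_cons, flatA_append]
    cases innerA n lines idx (PySem.List.pyRange 1 (i + 1) 1) with
    | inl e => rfl
    | inr idx' => exact ih _

theorem mem_widths (n j : Int) (h : j ∈ widthsList n) : 1 ≤ j ∧ j ≤ n := by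
  unfold widthsList at h
  rw [List.mem_flatMap] at h
  obtain ⟨i, hi, hj⟩ := h
  rw [PySem.List.mem_pyRange_one] at hi hj
  omega

theorem widths_two_mul (N : Nat) :
    2 * ((widthsList (N : Int)).length : Int) = (N : Int) * ((N : Int) + 1) := by
  induction N with
  | zero =>
    simp [widthsList]
  | succ N ih =>
    unfold widthsList at ih ⊢
    rw [show ((N + 1 : Nat) : Int) + 1 = ((N : Int) + 1) + 1 by push_cast; ring,
        PySem.List.pyRange_one_succ_right (by omega : (1:Int) ≤ (N : Int) + 1),
        List.flatMap_append]
    simp only [List.flatMap_cons, List.flatMap_nil, List.append_nil, List.length_append]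
    rw [PySem.List.length_pyRange_one]
    have hexp : ((N : Int) + 1) * ((N : Int) + 1 + 1) = (N : Int) * ((N : Int) + 1) + 2 * ((N : Int) + 1) := by
      ring
    push_cast at ih ⊢
    omega

theorem widths_len_le (n : Int) :
    ((widthsList n).length : Int) ≤ PySem.Int.floordiv (n * (n + 1)) 2 := by
  rw [PySem.Int.floordiv_eq_ediv_of_pos (by omega)]
  by_cases hn : 0 ≤ n
  · obtain ⟨N, rfl⟩ := Int.eq_ofNat_of_zero_le hn
    have := widths_two_mul N
    omega
  · have h0 : widthsList n = [] := by
      unfold widthsList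
      rw [PySem.List.pyRange_one_eq_nil (by omega)]
      rfl
    have hpos : 0 ≤ n * (n + 1) := by nlinarith
    have := Int.ediv_nonneg hpos (by omega)
    rw [h0]
    simp only [List.length_nil, Nat.cast_zero]
    omega

theorem flat_loop (n : Int) (lines : List String) (js : List Int) (idx : Nat)
    (hmem : ∀ j ∈ js, 1 ≤ j ∧ j ≤ n) (hlen : idx + js.length ≤ lines.length) :
    (match flatA n lines (idx : Int) js with
     | some e => e
     | none => (true, "Ok")) = loopB n (idx : Int) ((lines.drop idx).zip js) := by
  induction js generalizing idx with
  | nil => simp [flatA, loopB]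
  | cons j js ih =>
    have hidx : idx < lines.length := by simp at hlen; omega
    have hdrop : lines.drop idx = lines[idx] :: lines.drop (idx + 1) :=
      List.drop_eq_getElem_cons hidx
    have hget : PySem.List.pyGetD lines (idx : Int) "" = lines[idx] := by
      rw [PySem.List.pyGetD_natCast, List.getD_eq_getElem lines "" hidx]
    rw [hdrop]
    simp only [List.zip_cons_cons, flatA, loopB, hget]
    rw [checkLine_eq n (idx : Int) j lines[idx] (hmem j (by simp)).1 (hmem j (by simp)).2]
    cases lineError n (idx : Int) j lines[idx] with
    | some e => rfl
    | none =>
      have := ih (idx + 1) (fun j hj => hmem j (by simp [hj])) (by simp at hlen ⊢; omega)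
      simpa [Nat.cast_add] using this

-- ===== VERDICT (by name: the statement is the Claim_ definition above) =====
theorem check_py_spec : Claim_equal_check_py := by
  intro result answer _
  unfold Spec_check_py check_py check_py_alt
  set lines := popBlanks ((PySem.Str.split? result "\n").getD []) with hlines
  by_cases hlen : (lines.length : Int) ≠ PySem.Int.floordiv (answer * (answer + 1)) 2
  · simp only [if_pos hlen]
  · simp only [if_neg hlen]
    push_neg at hlen
    rw [outerA_eq_flat]
    have hle : (widthsList answer).length ≤ lines.length := by
      have := widths_len_le answer
      omega
    have := flat_loop answer lines (widthsList answer) 0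
      (fun j hj => mem_widths answer j hj) (by omega)
    simpa [widthsList] using this
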